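-- pv_equiv track=rewrite | github.com/Melodiz/CodeRun | Algorithms/Easy/546_k-segments/solution.py | min_segment_length
-- ===== SOURCE A (Python) =====
-- def min_segment_length(k, points):
--     points.sort()
--     left, right = 0, points[-1] - points[0]
--
--     def can_cover_with_length(length):
--         count, last_covered = 1, points[0]
--         for point in points:
--             if point - last_covered > length:
--                 count += 1
--                 last_covered = point
--                 if count > k:
--                     return False
--         return True
--
--     while left < right:
--         mid = (left + right) // 2
--         if can_cover_with_length(mid):
--             right = mid
--         else:
--             left = mid + 1
--
--     return left
-- ===== SOURCE B (Python) =====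
-- def min_segment_length(k, points):
--     points.sort()
--     n = len(points)
--     segs = min(k, n)
--     if segs < 1:
--         segs = 1
--     # dp[i-1] = minimal achievable maximum segment span covering the first i
--     # sorted points with the current number of segments
--     dp = [points[i - 1] - points[0] for i in range(1, n + 1)]
--     for _ in range(segs - 1):
--         new = []
--         for i in range(1, n + 1):
--             best = dp[i - 1]
--             for m in range(1, i):
--                 cand = max(dp[m - 1], points[i - 1] - points[m])
--                 if cand < best:
--                     best = cand
--             new.append(best)
--         dp = new
--     return dp[n - 1]
-- ===== Notes on version B (the rewrite author's own statement) =====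
-- stated objective: alternative
-- what changed: Replaces A's binary search on the answer with a greedy feasibility check by a bottom-up partition DP (dp[i][j] = minimal achievable maximum span covering the first i sorted points with j segments, segments capped at min(k,n)); both sort the list in place, and the equivalence proved is about the return value.
import Mathlib
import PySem

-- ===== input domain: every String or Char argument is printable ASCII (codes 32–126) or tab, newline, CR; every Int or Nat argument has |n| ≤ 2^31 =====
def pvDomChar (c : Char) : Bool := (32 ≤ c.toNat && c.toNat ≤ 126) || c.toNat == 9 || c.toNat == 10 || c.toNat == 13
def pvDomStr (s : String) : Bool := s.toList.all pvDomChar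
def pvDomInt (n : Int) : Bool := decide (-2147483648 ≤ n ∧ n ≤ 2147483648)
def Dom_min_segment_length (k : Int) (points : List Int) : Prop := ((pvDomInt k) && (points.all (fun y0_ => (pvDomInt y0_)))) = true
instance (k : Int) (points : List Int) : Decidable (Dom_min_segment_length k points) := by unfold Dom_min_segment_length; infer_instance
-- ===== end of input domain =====

-- Both A and B sort `points` in place (the same mutation); the equivalence proved here is about the return value.
-- B replaces A's binary-search-on-answer + greedy cover check by a bottom-up partition DP over the sorted points.

-- ===== PORT A =====

-- A's inner `can_cover_with_length` loop: state = (count, last_covered), early False on count > k.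
def ccLoop (k len : Int) : List Int → Int → Int → Bool
  | [], _, _ => true
  | p :: rest, count, last =>
    if p - last > len then
      if count + 1 > k then false
      else ccLoop k len rest (count + 1) p
    else ccLoop k len rest count last

def canCover (k : Int) (pts : List Int) (len : Int) : Bool :=
  ccLoop k len pts 1 (PySem.List.pyGetD pts 0 0)

-- A's `while left < right` binary search.
def bsearch (k : Int) (pts : List Int) (left right : Int) : Int :=
  if h : left < right then
    let mid := PySem.Int.floordiv (left + right) 2
    if canCover k pts mid then bsearch k pts left mid
    else bsearch k pts (mid + 1) right
  else left
termination_by (right - left).toNat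
decreasing_by
  all_goals
    have hb := PySem.Int.floordiv_two_mid_bounds (le_of_lt h)
    have hlt : PySem.Int.floordiv (left + right) 2 < right := by
      rw [PySem.Int.floordiv_lt_iff_lt_mul (by omega : (0:Int) < 2)]
      omega
    omega

def min_segment_length (k : Int) (points : List Int) : Int :=
  let pts := PySem.List.sorted points (fun x => x) false
  let left : Int := 0
  let right := PySem.List.pyGetD pts (-1) 0 - PySem.List.pyGetD pts 0 0
  bsearch k pts left right

-- ===== PORT B =====

-- one round of B's dp update: new[i-1] = min(dp[i-1], min over 1 ≤ m < i of max(dp[m-1], pts[i-1]-pts[m]))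
def dpStep (pts : List Int) (dp : List Int) : List Int :=
  (PySem.List.pyRange 1 ((PySem.List.len pts) + 1) 1).foldl
    (fun nw i =>
      let best := (PySem.List.pyRange 1 i 1).foldl
        (fun best m =>
          let cand := max (PySem.List.pyGetD dp (m - 1) 0)
                          (PySem.List.pyGetD pts (i - 1) 0 - PySem.List.pyGetD pts m 0)
          if cand < best then cand else best)
        (PySem.List.pyGetD dp (i - 1) 0)
      nw ++ [best]) []

def min_segment_length_alt (k : Int) (points : List Int) : Int :=
  let pts := PySem.List.sorted points (fun x => x) false
  let n := PySem.List.len pts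
  let segs0 := min k n
  let segs := if segs0 < 1 then 1 else segs0
  let dp0 := (PySem.List.pyRange 1 (n + 1) 1).map
      (fun i => PySem.List.pyGetD pts (i - 1) 0 - PySem.List.pyGetD pts 0 0)
  let dp := (PySem.List.pyRange 0 (segs - 1) 1).foldl (fun dp _ => dpStep pts dp) dp0
  PySem.List.pyGetD dp (n - 1) 0

-- ===== PRECONDITION & SPEC =====
-- Pre_ excludes only the empty list, on which A raises IndexError (points[-1]); B raises IndexError there too.
def Pre_min_segment_length (_k : Int) (points : List Int) : Prop := points ≠ []
instance (k : Int) (points : List Int) : Decidable (Pre_min_segment_length k points) := by unfold Pre_min_segment_length; infer_instance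

def pvWitness_min_segment_length : Int × List Int := (2, [1, 3, 9])

def Spec_min_segment_length (k : Int) (points : List Int) (out : Int) : Prop := out = min_segment_length_alt k points
instance (k : Int) (points : List Int) (out : Int) : Decidable (Spec_min_segment_length k points out) := by unfold Spec_min_segment_length; infer_instance

-- ===== CLAIM (what is proved, stated in full; the proofs are below) =====
def Claim_equal_min_segment_length : Prop := ∀ (k : Int) (points : List Int), Dom_min_segment_length k points → Pre_min_segment_length k points → Spec_min_segment_length k points (min_segment_length k points)

-- ===== LEMMAS AND PROOFS =====

-- number of extra segments greedy opens after the current one, given current anchor a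
def gcount (L : Int) : Int → List Int → Int
  | _, [] => 0
  | a, p :: rest => if p - a > L then 1 + gcount L p rest else gcount L a rest

-- greedy's final anchor
def ganchor (L : Int) : Int → List Int → Int
  | a, [] => a
  | a, p :: rest => if p - a > L then ganchor L p rest else ganchor L a rest

theorem gcount_nonneg (L a : Int) (xs : List Int) : 0 ≤ gcount L a xs := by
  induction xs generalizing a with
  | nil => simp [gcount]
  | cons p rest ih =>
    simp only [gcount]
    split
    · have := ih p; omega
    · exact ih a

theorem gcount_le_length (L a : Int) (xs : List Int) : gcount L a xs ≤ xs.length := by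
  induction xs generalizing a with
  | nil => simp [gcount]
  | cons p rest ih =>
    simp only [gcount, List.length_cons]
    split
    · have := ih p; omega
    · have := ih a; omega

theorem gcount_append (L a : Int) (xs ys : List Int) :
    gcount L a (xs ++ ys) = gcount L a xs + gcount L (ganchor L a xs) ys := by
  induction xs generalizing a with
  | nil => simp [gcount, ganchor]
  | cons p rest ih =>
    simp only [List.cons_append, gcount, ganchor]
    split
    · rw [ih p]; ring
    · rw [ih a]

theorem gcount_eq_zero_iff (L a : Int) (xs : List Int) :
    gcount L a xs = 0 ↔ ∀ x ∈ xs, x - a ≤ L := by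
  induction xs generalizing a with
  | nil => simp [gcount]
  | cons p rest ih =>
    simp only [gcount, List.mem_cons]
    split
    · rename_i h
      constructor
      · intro h0; exfalso; have := gcount_nonneg L p rest; omega
      · intro hall; exfalso; have := hall p (Or.inl rfl); omega
    · rename_i h
      rw [ih a]
      constructor
      · intro hall x hx
        rcases hx with rfl | hx
        · omega
        · exact hall x hx
      · intro hall x hx; exact hall x (Or.inr hx)

-- at most one extra split over a run whose elements all lie within L of a lower bound h
theorem gcount_le_one (L h : Int) (ys : List Int) (hh : ∀ y ∈ ys, h ≤ y)
    (hL : ∀ y ∈ ys, y - h ≤ L) : ∀ a, gcount L a ys ≤ 1 := by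
  induction ys with
  | nil => intro a; simp [gcount]
  | cons p rest ih =>
    intro a
    have hp : h ≤ p := hh p (List.mem_cons_self)
    simp only [gcount]
    split
    · have h0 : gcount L p rest = 0 := by
        rw [gcount_eq_zero_iff]
        intro z hz
        have := hL z (List.mem_cons_of_mem _ hz)
        omega
      omega
    · exact ih (fun y hy => hh y (List.mem_cons_of_mem _ hy))
        (fun y hy => hL y (List.mem_cons_of_mem _ hy)) a

-- last-split decomposition of a greedy run
theorem gcount_split (L a : Int) (xs : List Int) (h : 1 ≤ gcount L a xs) :
    ∃ u q v, xs = u ++ q :: v ∧ gcount L a u = gcount L a xs - 1 ∧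
      q - ganchor L a u > L ∧ gcount L q v = 0 := by
  induction xs generalizing a with
  | nil => simp [gcount] at h
  | cons p rest ih =>
    by_cases h1 : p - a > L
    · by_cases h0 : 1 ≤ gcount L p rest
      · obtain ⟨u, q, v, hx, hc, hq, hv⟩ := ih p h0
        refine ⟨p :: u, q, v, by rw [hx]; rfl, ?_, ?_, hv⟩
        · simp only [gcount, if_pos h1]
          omega
        · simpa only [ganchor, if_pos h1] using hq
      · have h00 : gcount L p rest = 0 := by have := gcount_nonneg L p rest; omega
        refine ⟨[], p, rest, rfl, ?_, ?_, h00⟩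
        · simp only [gcount, if_pos h1, h00]; rfl
        · simpa [ganchor] using h1
    · have hr : 1 ≤ gcount L a rest := by
        simp only [gcount, if_neg h1] at h; exact h
      obtain ⟨u, q, v, hx, hc, hq, hv⟩ := ih a hr
      refine ⟨p :: u, q, v, by rw [hx]; rfl, ?_, ?_, hv⟩
      · simp only [gcount, if_neg h1]
        exact hc
      · simpa only [ganchor, if_neg h1] using hq

-- A's can_cover loop computes the greedy count against the cap max(k, count)
theorem ccLoop_eq (k L : Int) (xs : List Int) :
    ∀ count last, ccLoop k L xs count last = decide (count + gcount L last xs ≤ max k count) := by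
  induction xs with
  | nil =>
    intro count last
    simp [ccLoop, gcount]
  | cons p rest ih =>
    intro count last
    simp only [ccLoop, gcount]
    by_cases h1 : p - last > L
    · simp only [if_pos h1]
      by_cases h2 : count + 1 > k
      · simp only [if_pos h2]
        have := gcount_nonneg L p rest
        have : ¬ (count + (1 + gcount L p rest) ≤ max k count) := by
          rcases max_cases k count with ⟨he, _⟩ | ⟨he, _⟩ <;> omega
        simp [this]
      · simp only [if_neg h2, ih]
        have e1 : max k (count + 1) = k := by omega
        have e2 : max k count = k := by omega
        rw [e1, e2]
        congr 1
        simp only [eq_iff_iff]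
        omega
    · simp only [if_neg h1, ih]

theorem canCover_eq (k L p0 : Int) (tl : List Int) :
    canCover k (p0 :: tl) L = decide (1 + gcount L p0 (p0 :: tl) ≤ max k 1) := by
  rw [canCover, ccLoop_eq]
  have : PySem.List.pyGetD (p0 :: tl) 0 0 = p0 := by
    simp [PySem.List.pyGetD_zero_cons]
  rw [this]

-- sortedness gives index monotonicity
theorem pairwise_getD_mono (pts : List Int) (hs : pts.Pairwise (· ≤ ·))
    {i j : Nat} (hij : i ≤ j) (hj : j < pts.length) :
    pts.getD i 0 ≤ pts.getD j 0 := by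
  rcases eq_or_lt_of_le hij with rfl | hlt
  · exact le_refl _
  · rw [List.getD_eq_getElem _ _ (lt_of_le_of_lt hij hj), List.getD_eq_getElem _ _ hj]
    exact List.pairwise_iff_getElem.mp hs i j (lt_of_le_of_lt hij hj) hj hlt

theorem getD_append_add (u l : List Int) (t : Nat) :
    (u ++ l).getD (u.length + t) 0 = l.getD t 0 := by
  induction u with
  | nil => simp
  | cons x u ih =>
    have : (x :: u).length + t = ((u.length + t) + 1) := by simp; omega
    rw [this, List.cons_append, List.getD_cons_succ, ih]

theorem getD_take_eq (pts : List Int) (t i : Nat) (hti : t < i) (hil : i ≤ pts.length) :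
    (pts.take i).getD t 0 = pts.getD t 0 := by
  rw [List.getD_eq_getElem _ 0 (by rw [List.length_take]; omega),
      List.getD_eq_getElem _ 0 (by omega), List.getElem_take]

-- ===== the partition recurrence for the greedy count on prefixes =====
-- prefix greedy count: pts.take i covered, anchored at the first point
theorem gcount_disj (L : Int) (pts : List Int) (hs : pts.Pairwise (· ≤ ·))
    (p0 : Int) (hp0 : pts.getD 0 0 = p0) (hL : 0 ≤ L) (j : Int) (hj : 1 ≤ j)
    (i : Nat) (hi1 : 1 ≤ i) (hin : i ≤ pts.length) :
    (gcount L p0 (pts.take i) ≤ j ↔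
      gcount L p0 (pts.take i) ≤ j - 1 ∨
      ∃ m : Nat, 1 ≤ m ∧ m < i ∧ gcount L p0 (pts.take m) ≤ j - 1 ∧
        pts.getD (i - 1) 0 - pts.getD m 0 ≤ L) := by
  have hlen : (pts.take i).length = i := by
    rw [List.length_take]; omega
  constructor
  · -- peel off the last greedy segment
    intro h
    by_cases hle : gcount L p0 (pts.take i) ≤ j - 1
    · exact Or.inl hle
    right
    have hg1 : 1 ≤ gcount L p0 (pts.take i) := by omega
    obtain ⟨u, q, v, hx, hc, hq, hv⟩ := gcount_split L p0 (pts.take i) hg1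
    have hlen2 : u.length + (v.length + 1) = i := by
      have := congrArg List.length hx
      simp [hlen] at this
      omega
    have hune : u ≠ [] := by
      intro hu
      subst hu
      simp only [List.nil_append] at hx
      have hq0 : q = p0 := by
        have h0 : (pts.take i).getD 0 0 = pts.getD 0 0 := getD_take_eq pts 0 i (by omega) (by omega)
        rw [hx] at h0
        rw [hp0] at h0
        simpa using h0
      simp [ganchor, hq0] at hq
      omega
    set m := u.length with hm
    have hm1 : 1 ≤ m := by
      cases u with
      | nil => exact absurd rfl hune
      | cons _ _ => simp [hm]
    have hmi : m < i := by omega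
    have hu : pts.take m = u := by
      have h1 : (pts.take i).take m = u := by rw [hx, hm, List.take_left]
      rw [List.take_take] at h1
      rwa [min_eq_left (le_of_lt hmi)] at h1
    refine ⟨m, hm1, hmi, ?_, ?_⟩
    · rw [hu, hc]; omega
    · have hqm : pts.getD m 0 = q := by
        have h1 : (pts.take i).getD m 0 = pts.getD m 0 := getD_take_eq pts m i hmi (by omega)
        rw [hx] at h1
        have h2 : (u ++ q :: v).getD (m + 0) 0 = (q :: v).getD 0 0 := getD_append_add u (q :: v) 0
        simp only [Nat.add_zero] at h2
        rw [h2] at h1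
        simpa using h1.symm
      have hil : pts.getD (i - 1) 0 = (q :: v).getD (i - 1 - m) 0 := by
        have h1 : (pts.take i).getD (i - 1) 0 = pts.getD (i - 1) 0 := getD_take_eq pts (i - 1) i (by omega) (by omega)
        have h2 : (u ++ q :: v).getD (m + (i - 1 - m)) 0 = (q :: v).getD (i - 1 - m) 0 := getD_append_add u (q :: v) (i - 1 - m)
        have h3 : m + (i - 1 - m) = i - 1 := by omega
        rw [h3] at h2
        rw [hx] at h1
        rw [h2] at h1
        exact h1.symm
      rw [hqm, hil]
      rcases Nat.eq_zero_or_pos (i - 1 - m) with h0 | h0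
      · simp [h0]; omega
      · have hvl : i - 1 - m - 1 < v.length := by omega
        have : (q :: v).getD (i - 1 - m) 0 = v.getD (i - 1 - m - 1) 0 := by
          cases h00 : i - 1 - m with
          | zero => omega
          | succ t =>
            rw [List.getD_cons_succ]
            congr 1
        rw [this, List.getD_eq_getElem v 0 hvl]
        have hmem : v[i - 1 - m - 1] ∈ v := List.getElem_mem hvl
        exact (gcount_eq_zero_iff L q v).mp hv _ hmem
  · -- glue: a cover of the first m points plus one segment [pts[m], pts[i-1]]
    rintro (h | ⟨m, hm1, hmi, hgm, hspan⟩)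
    · omega
    have hsplit : pts.take i = pts.take m ++ (pts.take i).drop m := by
      conv_lhs => rw [← List.take_append_drop m (pts.take i)]
      rw [List.take_take, min_eq_left (le_of_lt hmi)]
    rw [hsplit, gcount_append]
    have hone : gcount L (ganchor L p0 (pts.take m)) ((pts.take i).drop m) ≤ 1 := by
      apply gcount_le_one L (pts.getD m 0)
      · intro y hy
        obtain ⟨t, ht, rfl⟩ := List.mem_iff_getElem.mp hy
        have htl : t < i - m := by
          have := List.length_drop (l := pts.take i) (i := m)
          rw [hlen] at this
          omega
        have he : ((pts.take i).drop m)[t] = pts.getD (m + t) 0 := by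
          rw [List.getElem_drop, List.getElem_take]
          rw [List.getD_eq_getElem pts 0 (by omega)]
        rw [he]
        exact pairwise_getD_mono pts hs (Nat.le_add_right m t) (by omega)
      · intro y hy
        obtain ⟨t, ht, rfl⟩ := List.mem_iff_getElem.mp hy
        have htl : t < i - m := by
          have := List.length_drop (l := pts.take i) (i := m)
          rw [hlen] at this
          omega
        have he : ((pts.take i).drop m)[t] = pts.getD (m + t) 0 := by
          rw [List.getElem_drop, List.getElem_take]
          rw [List.getD_eq_getElem pts 0 (by omega)]
        rw [he]
        have h1 : pts.getD (m + t) 0 ≤ pts.getD (i - 1) 0 :=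
          pairwise_getD_mono pts hs (by omega) (by omega)
        omega
    have hA : gcount L p0 (pts.take m) ≤ j - 1 := hgm
    omega

-- min-fold characterisation
theorem foldl_minif_le_iff {α : Type} (f : α → Int) (ms : List α) (b L : Int) :
    (ms.foldl (fun best x => if f x < best then f x else best) b ≤ L ↔
      b ≤ L ∨ ∃ x ∈ ms, f x ≤ L) := by
  induction ms generalizing b with
  | nil => simp
  | cons m rest ih =>
    simp only [List.foldl_cons, ih, List.mem_cons]
    constructor
    · rintro (h | ⟨x, hx, hfx⟩)
      · split at h
        · exact Or.inr ⟨m, Or.inl rfl, h⟩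
        · exact Or.inl h
      · exact Or.inr ⟨x, Or.inr hx, hfx⟩
    · rintro (h | ⟨x, hx, hfx⟩)
      · left; split <;> omega
      · rcases hx with rfl | hx
        · left; split <;> omega
        · exact Or.inr ⟨x, hx, hfx⟩

theorem foldl_minif_nonneg {α : Type} (f : α → Int) (ms : List α) (b : Int) (hb : 0 ≤ b)
    (hf : ∀ x ∈ ms, 0 ≤ f x) :
    0 ≤ ms.foldl (fun best x => if f x < best then f x else best) b := by
  induction ms generalizing b with
  | nil => simpa
  | cons m rest ih =>
    simp only [List.foldl_cons]
    apply ih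
    · have := hf m (List.mem_cons_self); split <;> omega
    · exact fun x hx => hf x (List.mem_cons_of_mem _ hx)

-- the invariant carried through B's dp iterations
def Good (pts : List Int) (j : Int) (dp : List Int) : Prop :=
  dp.length = pts.length ∧
  ∀ i : Nat, i < pts.length →
    0 ≤ dp.getD i 0 ∧
    ∀ L : Int, 0 ≤ L →
      (dp.getD i 0 ≤ L ↔ gcount L (pts.getD 0 0) (pts.take (i + 1)) ≤ j - 1)

theorem dp0_eq (pts : List Int) :
    (PySem.List.pyRange 1 ((PySem.List.len pts) + 1) 1).map
      (fun i => PySem.List.pyGetD pts (i - 1) 0 - PySem.List.pyGetD pts 0 0)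
    = (List.range pts.length).map (fun kk => pts.getD kk 0 - pts.getD 0 0) := by
  rw [PySem.List.pyRange_one]
  simp only [PySem.List.len_eq]
  have h1 : ((pts.length : Int) + 1 - 1).toNat = pts.length := by omega
  rw [h1, List.map_map]
  apply List.map_congr_left
  intro kk _
  simp only [Function.comp_apply, add_sub_cancel_left, PySem.List.pyGetD_natCast,
    PySem.List.pyGetD_zero]

theorem good_base (pts : List Int) (hs : pts.Pairwise (· ≤ ·)) :
    Good pts 1 ((PySem.List.pyRange 1 ((PySem.List.len pts) + 1) 1).map
      (fun i => PySem.List.pyGetD pts (i - 1) 0 - PySem.List.pyGetD pts 0 0)) := by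
  rw [dp0_eq]
  constructor
  · simp
  · intro i hi
    have hentry : ((List.range pts.length).map (fun kk => pts.getD kk 0 - pts.getD 0 0)).getD i 0
        = pts.getD i 0 - pts.getD 0 0 := by
      rw [List.getD_eq_getElem _ _ (by simpa using hi)]
      simp
    rw [hentry]
    refine ⟨by have := pairwise_getD_mono pts hs (Nat.zero_le i) hi; omega, ?_⟩
    intro L hL
    have hgz : (gcount L (pts.getD 0 0) (pts.take (i+1)) ≤ (1:Int) - 1) ↔
        gcount L (pts.getD 0 0) (pts.take (i+1)) = 0 := by
      have := gcount_nonneg L (pts.getD 0 0) (pts.take (i+1))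
      constructor <;> intro <;> omega
    rw [hgz, gcount_eq_zero_iff]
    constructor
    · intro hd x hx
      obtain ⟨t, ht, rfl⟩ := List.mem_iff_getElem.mp hx
      have htl : t < i + 1 := by
        have := List.length_take (i := i+1) (l := pts)
        omega
      have he : (pts.take (i+1))[t] = pts.getD t 0 := by
        rw [List.getElem_take, List.getD_eq_getElem pts 0 (by omega)]
      rw [he]
      have := pairwise_getD_mono pts hs (show t ≤ i by omega) hi
      omega
    · intro hall
      have hil : i < (pts.take (i+1)).length := by
        rw [List.length_take]; omega
      have hmem : pts.getD i 0 ∈ pts.take (i+1) := by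
        have he : (pts.take (i+1))[i] = pts.getD i 0 := by
          rw [List.getElem_take, List.getD_eq_getElem pts 0 hi]
        rw [← he]
        exact List.getElem_mem hil
      have := hall _ hmem
      omega

theorem dpStep_eq (pts dp : List Int) :
    dpStep pts dp = (PySem.List.pyRange 1 ((PySem.List.len pts) + 1) 1).map
      (fun i => (PySem.List.pyRange 1 i 1).foldl
        (fun best m =>
          if max (PySem.List.pyGetD dp (m - 1) 0)
                 (PySem.List.pyGetD pts (i - 1) 0 - PySem.List.pyGetD pts m 0) < best
          then max (PySem.List.pyGetD dp (m - 1) 0)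
                   (PySem.List.pyGetD pts (i - 1) 0 - PySem.List.pyGetD pts m 0)
          else best)
        (PySem.List.pyGetD dp (i - 1) 0)) := by
  simp only [dpStep, PySem.List.foldl_append_singleton_eq_map, List.nil_append]

theorem dpStep_getD (pts dp : List Int) (kk : Nat) (hkk : kk < pts.length) :
    (dpStep pts dp).getD kk 0 =
      (List.range kk).foldl
        (fun best t =>
          if max (dp.getD t 0) (pts.getD kk 0 - pts.getD (t + 1) 0) < best
          then max (dp.getD t 0) (pts.getD kk 0 - pts.getD (t + 1) 0)
          else best)
        (dp.getD kk 0) := by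
  have hc : ∀ t : Nat, (1 : Int) + (t : Int) = ((t + 1 : Nat) : Int) := by
    intro t; push_cast; ring
  rw [dpStep_eq, PySem.List.pyRange_one]
  simp only [PySem.List.len_eq]
  have h1 : ((pts.length : Int) + 1 - 1).toNat = pts.length := by omega
  rw [h1, List.map_map]
  rw [List.getD_eq_getElem _ _ (by simpa using hkk)]
  simp only [List.getElem_map, List.getElem_range, Function.comp_apply]
  rw [PySem.List.pyRange_one]
  have h2 : ((1 : Int) + (kk : Int) - 1).toNat = kk := by omega
  rw [h2, List.foldl_map]
  have hd : ∀ t : Nat, ((t + 1 : Nat) : Int) - 1 = (t : Int) := by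
    intro t; push_cast; ring
  simp only [hc, hd, PySem.List.pyGetD_natCast]

theorem good_step (pts : List Int) (hs : pts.Pairwise (· ≤ ·))
    (j : Int) (hj : 1 ≤ j) (dp : List Int) (hg : Good pts j dp) :
    Good pts (j + 1) (dpStep pts dp) := by
  obtain ⟨hlen, hent⟩ := hg
  constructor
  · rw [dpStep_eq]
    simp [PySem.List.length_pyRange_one]
  · intro kk hkk
    rw [dpStep_getD pts dp kk hkk]
    constructor
    · apply foldl_minif_nonneg
      · exact (hent kk hkk).1
      · intro t ht
        have htk : t < kk := List.mem_range.mp ht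
        have := (hent t (by omega)).1
        exact le_trans this (le_max_left _ _)
    · intro L hL
      rw [foldl_minif_le_iff]
      have hgoal1 : j + 1 - 1 = j := by omega
      rw [hgoal1]
      rw [gcount_disj L pts hs (pts.getD 0 0) rfl hL j hj (kk + 1) (by omega) (by omega)]
      have hbase := (hent kk hkk).2 L hL
      simp only [Nat.add_sub_cancel]
      constructor
      · rintro (h | ⟨t, ht, hft⟩)
        · left; rwa [← hbase]
        · right
          have htk : t < kk := List.mem_range.mp ht
          refine ⟨t + 1, by omega, by omega, ?_, ?_⟩
          · rw [← (hent t (by omega)).2 L hL]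
            exact le_trans (le_max_left _ _) hft
          · exact le_trans (le_max_right _ _) hft
      · rintro (h | ⟨m, hm1, hmk, hgm, hsp⟩)
        · left; rwa [hbase]
        · right
          refine ⟨m - 1, List.mem_range.mpr (by omega), ?_⟩
          rw [max_le_iff]
          have hm : m - 1 + 1 = m := by omega
          constructor
          · rw [(hent (m - 1) (by omega)).2 L hL, hm]
            exact hgm
          · rw [hm]
            exact hsp

-- binary search finds the unique D with 0 ≤ D, Feas(L) ↔ D ≤ L
theorem bsearch_eq (k : Int) (pts : List Int) (D : Int)
    (hiff : ∀ L, 0 ≤ L → (canCover k pts L = true ↔ D ≤ L)) :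
    ∀ l r, 0 ≤ l → l ≤ D → D ≤ r → bsearch k pts l r = D := by
  have H : ∀ n : Nat, ∀ l r, (r - l).toNat = n → 0 ≤ l → l ≤ D → D ≤ r → bsearch k pts l r = D := by
    intro n
    induction n using Nat.strong_induction_on with
    | _ n ih =>
      intro l r hn h0 hlD hDr
      rw [bsearch]
      by_cases hlr : l < r
      · have hb := PySem.Int.floordiv_two_mid_bounds (le_of_lt hlr)
        have hlt : PySem.Int.floordiv (l + r) 2 < r := by
          rw [PySem.Int.floordiv_lt_iff_lt_mul (by omega : (0:Int) < 2)]; omega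
        simp only [dif_pos hlr]
        set mid := PySem.Int.floordiv (l + r) 2 with hmid
        have hmid0 : 0 ≤ mid := by omega
        by_cases hcc : D ≤ mid
        · rw [if_pos ((hiff mid hmid0).mpr hcc)]
          exact ih ((mid - l).toNat) (by omega) l mid rfl h0 hlD hcc
        · have hcf : ¬ (canCover k pts mid = true) := fun hc => hcc ((hiff mid hmid0).mp hc)
          rw [if_neg hcf]
          exact ih ((r - (mid + 1)).toNat) (by omega) (mid + 1) r rfl (by omega) (by omega) hDr
      · simp only [dif_neg hlr]
        omega
  intro l r h1 h2 h3
  exact H _ l r rfl h1 h2 h3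

theorem good_iter (pts : List Int) (hs : pts.Pairwise (· ≤ ·)) :
    ∀ (ls : List Int) (j : Int) (dp : List Int), 1 ≤ j → Good pts j dp →
      Good pts (j + ls.length) (ls.foldl (fun d _ => dpStep pts d) dp) := by
  intro ls
  induction ls with
  | nil => intro j dp _ hg; simpa using hg
  | cons x t ih =>
    intro j dp hj hg
    have h1 := ih (j + 1) (dpStep pts dp) (by omega) (good_step pts hs j hj dp hg)
    simp only [List.foldl_cons, List.length_cons]
    have he : j + ((t.length + 1 : Nat) : Int) = (j + 1) + (t.length : Int) := by
      push_cast; ring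
    rw [he]
    exact h1

-- ===== VERDICT (by name: the statement is the Claim_ definition above) =====
theorem min_segment_length_spec : Claim_equal_min_segment_length := by
  intro k points _ hpre
  show min_segment_length k points = min_segment_length_alt k points
  simp only [min_segment_length, min_segment_length_alt, PySem.List.len_eq]
  set pts := PySem.List.sorted points (fun x => x) false with hpts
  have hne : pts ≠ [] := by
    rw [hpts, Ne, PySem.List.sorted_eq_nil_iff]
    exact hpre
  have hs : pts.Pairwise (· ≤ ·) := by
    have h := PySem.List.sorted_pairwise (xs := points) (key := fun x => x)
    simpa using h
  have hn1 : 1 ≤ pts.length := by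
    have := List.length_pos_of_ne_nil hne
    omega
  set n := pts.length with hn
  set p0 := pts.getD 0 0 with hp0
  set segs : Int := (if min k (n : Int) < 1 then 1 else min k (n : Int)) with hsegs
  have hsegs1 : 1 ≤ segs := by
    rw [hsegs]; split <;> omega
  -- the final dp list is Good for segs segments
  have hgood0 := good_base pts hs
  simp only [PySem.List.len_eq] at hgood0
  have hgoodF := good_iter pts hs (PySem.List.pyRange 0 (segs - 1) 1) 1 _ (le_refl 1) hgood0
  have hlenr : (((PySem.List.pyRange 0 (segs - 1) 1).length : Nat) : Int) = segs - 1 := by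
    rw [PySem.List.length_pyRange_one]
    omega
  rw [show (1 : Int) + ((PySem.List.pyRange 0 (segs - 1) 1).length : Int) = segs by omega] at hgoodF
  obtain ⟨hlenF, hentF⟩ := hgoodF
  set dpF := (PySem.List.pyRange 0 (segs - 1) 1).foldl
      (fun d _ => dpStep pts d)
      ((PySem.List.pyRange 1 ((n : Int) + 1) 1).map
        (fun i => PySem.List.pyGetD pts (i - 1) 0 - PySem.List.pyGetD pts 0 0)) with hdpF
  set D := dpF.getD (n - 1) 0 with hDdef
  have hDprop := hentF (n - 1) (by omega)
  have hD0 : 0 ≤ D := hDprop.1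
  have hDiff : ∀ L, 0 ≤ L → (D ≤ L ↔ gcount L p0 pts ≤ segs - 1) := by
    intro L hL
    have h := hDprop.2 L hL
    rwa [show n - 1 + 1 = n from by omega, hn, List.take_length] at h
  obtain ⟨q0, tl, hcons⟩ := List.exists_cons_of_ne_nil hne
  have hq0 : p0 = q0 := by rw [hp0, hcons]; rfl
  have hGpts : ∀ L, gcount L q0 (q0 :: tl) = gcount L p0 pts := by
    intro L; rw [hcons, hq0]
  have hntl : n = tl.length + 1 := by rw [hn, hcons]; rfl
  have hGn : ∀ L, 0 ≤ L → gcount L p0 pts ≤ (n : Int) - 1 := by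
    intro L hL
    rw [← hGpts]
    have h1 : ¬ (q0 - q0 > L) := by omega
    simp only [gcount, if_neg h1]
    have := gcount_le_length L q0 tl
    omega
  have hiff : ∀ L, 0 ≤ L → (canCover k pts L = true ↔ D ≤ L) := by
    intro L hL
    rw [hcons, canCover_eq, decide_eq_true_iff, hGpts, hDiff L hL]
    have hb := hGn L hL
    rw [hsegs]
    split <;> omega
  -- the right endpoint: pts[-1] - pts[0]
  have hlast : PySem.List.pyGetD pts (-1) 0 = pts.getD (n - 1) 0 := by
    rw [PySem.List.pyGetD_neg_one pts 0 hne, List.getLast_eq_getElem,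
        List.getD_eq_getElem pts 0 (by omega)]
  have hzero : PySem.List.pyGetD pts 0 0 = p0 := by
    rw [PySem.List.pyGetD_zero, hp0]
  have hspan0 : 0 ≤ pts.getD (n - 1) 0 - p0 := by
    have := pairwise_getD_mono pts hs (Nat.zero_le (n - 1)) (by omega)
    omega
  have hccall : ∀ L : Int, (∀ x ∈ pts, x - p0 ≤ L) → canCover k pts L = true := by
    intro L hall
    rw [hcons, canCover_eq, decide_eq_true_iff, hGpts]
    have h0 : gcount L p0 pts = 0 := (gcount_eq_zero_iff L p0 pts).mpr hall
    rw [h0]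
    have := le_max_right k (1 : Int)
    omega
  have hcc : canCover k pts (pts.getD (n - 1) 0 - p0) = true := by
    apply hccall
    intro x hx
    obtain ⟨t, ht, rfl⟩ := List.mem_iff_getElem.mp hx
    have he : pts[t] = pts.getD t 0 := (List.getD_eq_getElem pts 0 ht).symm
    rw [he]
    have := pairwise_getD_mono pts hs (show t ≤ n - 1 by omega) (by omega)
    omega
  have hDspan : D ≤ pts.getD (n - 1) 0 - p0 :=
    (hiff _ hspan0).mp hcc
  -- both sides
  rw [hlast, hzero]
  have hrhs : PySem.List.pyGetD dpF ((n : Int) - 1) 0 = D := by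
    rw [show ((n : Int) - 1) = ((n - 1 : Nat) : Int) by omega, PySem.List.pyGetD_natCast, hDdef]
  rw [hrhs]
  exact bsearch_eq k pts D hiff 0 _ (le_refl 0) hD0 hDspan
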